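-- pv_equiv track=rewrite | github.com/romado33/UncommonRhymesV2 | scripts/migrate_words_add_tail_keys.py | tail_parts
-- ===== SOURCE A (Python) =====
-- from typing import List, Tuple
--
-- VOWELS = {
--     "AA","AE","AH","AO","AW","AY","EH","ER","EY","IH","IY","OW","OY","UH","UW"
-- }
--
-- def is_vowel(p: str) -> bool:
--     core = p[:-1] if p and p[-1].isdigit() else p
--     return core in VOWELS
--
-- def stress_digit(p: str) -> int:
--     return int(p[-1]) if p and p[-1].isdigit() else 0
--
-- def vowel_core(p: str) -> str:
--     return p[:-1] if p and p[-1].isdigit() else p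
--
-- def tail_parts(pron: List[str]) -> Tuple[List[str], str, Tuple[str, ...]]:
--     """
--     Return (tail, vowel_core, coda_tuple)
--       - tail: from last stressed vowel (1/2), else last vowel, to end
--       - vowel_core: e.g., 'IH' for 'IH1'
--       - coda: consonants after that vowel within the tail
--     """
--     if not pron:
--         return [], "", ()
--     idx = -1
--     # last stressed vowel
--     for i in range(len(pron)-1, -1, -1):
--         if is_vowel(pron[i]) and stress_digit(pron[i]) in (1, 2):
--             idx = i
--             break
--     # else last vowel
--     if idx == -1:
--         for i in range(len(pron)-1, -1, -1):
--             if is_vowel(pron[i]):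
--                 idx = i
--                 break
--     if idx == -1:
--         return [], "", ()
--     tail = pron[idx:]
--     nuc = vowel_core(pron[idx])
--     coda = tuple(p for p in tail[1:] if not is_vowel(p))
--     return tail, nuc, coda
-- ===== SOURCE B (Python) =====
-- from typing import List, Tuple
--
-- VOWELS = {
--     "AA","AE","AH","AO","AW","AY","EH","ER","EY","IH","IY","OW","OY","UH","UW"
-- }
--
-- def is_vowel(p: str) -> bool:
--     core = p[:-1] if p and p[-1].isdigit() else p
--     return core in VOWELS
--
-- def stress_digit(p: str) -> int:
--     return int(p[-1]) if p and p[-1].isdigit() else 0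
--
-- def vowel_core(p: str) -> str:
--     return p[:-1] if p and p[-1].isdigit() else p
--
-- def tail_parts(pron: List[str]) -> Tuple[List[str], str, Tuple[str, ...]]:
--     # One forward pass: remember the last vowel index and the last stressed-vowel index.
--     best_stressed = None
--     best_vowel = None
--     for i, p in enumerate(pron):
--         if is_vowel(p):
--             best_vowel = i
--             if stress_digit(p) in (1, 2):
--                 best_stressed = i
--     idx = best_stressed if best_stressed is not None else best_vowel
--     if idx is None:
--         return [], "", ()
--     tail = pron[idx:]
--     return tail, vowel_core(pron[idx]), tuple(p for p in tail[1:] if not is_vowel(p))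
-- ===== Notes on version B (the rewrite author's own statement) =====
-- stated objective: simpler
-- what changed: Replaces A's two backward scans with break (last stressed vowel, then last vowel) by a single forward pass that keeps the last vowel index and the last stressed-vowel index in two accumulators; one traversal and one predicate evaluation per element instead of up to two.
import Mathlib
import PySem

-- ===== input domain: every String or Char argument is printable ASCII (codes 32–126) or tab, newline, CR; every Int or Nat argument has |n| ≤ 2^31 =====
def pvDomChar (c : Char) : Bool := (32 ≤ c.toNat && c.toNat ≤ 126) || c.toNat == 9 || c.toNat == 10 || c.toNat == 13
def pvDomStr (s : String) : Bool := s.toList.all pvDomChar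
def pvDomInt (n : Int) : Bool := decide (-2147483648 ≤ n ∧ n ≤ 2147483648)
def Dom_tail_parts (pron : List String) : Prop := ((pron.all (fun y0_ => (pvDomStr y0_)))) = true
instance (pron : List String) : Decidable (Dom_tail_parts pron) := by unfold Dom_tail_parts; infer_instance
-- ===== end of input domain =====

-- B replaces A's two backward scans with one forward pass that remembers the last vowel
-- index and the last stressed-vowel index (objective: simpler; one pass instead of two).

-- shared module-level helpers (used by both A and B, as in the Python module)
def pvVowels : List String :=
  ["AA","AE","AH","AO","AW","AY","EH","ER","EY","IH","IY","OW","OY","UH","UW"]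

-- p[:-1] if p and p[-1].isdigit() else p   (p[-1] on a nonempty string = getLast?; p[:-1] = dropLast)
def pvVowelCore (p : String) : String :=
  match p.toList.getLast? with
  | some c => if PySem.Chars.isdigit c then String.ofList p.toList.dropLast else p
  | none => p

def pvIsVowel (p : String) : Bool := pvVowels.contains (pvVowelCore p)

-- int(p[-1]) if p and p[-1].isdigit() else 0; int of a single ASCII digit char is exactly toNat - 48
def pvStressDigit (p : String) : Int :=
  match p.toList.getLast? with
  | some c => if PySem.Chars.isdigit c then (c.toNat : Int) - 48 else 0
  | none => 0

-- ===== PORT A =====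
def tail_parts (pron : List String) : List String × String × List String :=
  if pron = [] then ([], "", [])
  else
    -- last stressed vowel: for i in range(len(pron)-1, -1, -1): if cond: idx = i; break
    let idx0 : Int :=
      ((PySem.List.pyRange ((pron.length : Int) - 1) (-1) (-1)).find?
        (fun i => pvIsVowel (PySem.List.pyGetD pron i "") &&
          (pvStressDigit (PySem.List.pyGetD pron i "") == 1 ||
           pvStressDigit (PySem.List.pyGetD pron i "") == 2))).getD (-1)
    -- else last vowel
    let idx : Int :=
      if idx0 = -1 then
        ((PySem.List.pyRange ((pron.length : Int) - 1) (-1) (-1)).find?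
          (fun i => pvIsVowel (PySem.List.pyGetD pron i ""))).getD (-1)
      else idx0
    if idx = -1 then ([], "", [])
    else
      let tail := PySem.List.slice pron (some idx) none
      let nuc := pvVowelCore (PySem.List.pyGetD pron idx "")
      let coda := (PySem.List.slice tail (some 1) none).filter (fun p => ! pvIsVowel p)
      (tail, nuc, coda)

-- ===== PORT B =====
def tail_parts_alt (pron : List String) : List String × String × List String :=
  let acc := (PySem.List.enumerate pron).foldl
    (fun (acc : Option Int × Option Int) ip =>
      if pvIsVowel ip.2 then
        ((if pvStressDigit ip.2 == 1 || pvStressDigit ip.2 == 2 then some ip.1 else acc.1),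
         some ip.1)
      else acc)
    (none, none)
  match acc.1.orElse (fun _ => acc.2) with
  | none => ([], "", [])
  | some idx =>
    let tail := PySem.List.slice pron (some idx) none
    (tail, pvVowelCore (PySem.List.pyGetD pron idx ""),
      (PySem.List.slice tail (some 1) none).filter (fun p => ! pvIsVowel p))

-- ===== PRECONDITION & SPEC =====
def Spec_tail_parts (pron : List String) (out : List String × String × List String) : Prop := out = tail_parts_alt pron
instance (pron : List String) (out : List String × String × List String) : Decidable (Spec_tail_parts pron out) := by unfold Spec_tail_parts; infer_instance

-- ===== CLAIM (what is proved, stated in full; the proofs are below) =====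
def Claim_equal_tail_parts : Prop := ∀ (pron : List String), Dom_tail_parts pron → Spec_tail_parts pron (tail_parts pron)

-- ===== LEMMAS AND PROOFS =====

-- A's backward search, as a named expression
def pvFind (q : String → Bool) (pron : List String) : Option Int :=
  (PySem.List.pyRange ((pron.length : Int) - 1) (-1) (-1)).find?
    (fun i => q (PySem.List.pyGetD pron i ""))

lemma pvFind_nonneg (q : String → Bool) (pron : List String) (s : Int)
    (h : pvFind q pron = some s) : 0 ≤ s := by
  unfold pvFind at h
  have hm := List.mem_of_find?_eq_some h
  rw [PySem.List.mem_pyRange_neg_one] at hm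
  omega

lemma find?_congr_mem {α : Type} {p q : α → Bool} :
    ∀ l : List α, (∀ a ∈ l, p a = q a) → l.find? p = l.find? q := by
  intro l h
  induction l with
  | nil => rfl
  | cons a t ih =>
    simp only [List.find?]
    rw [h a (by simp)]
    cases q a with
    | true => rfl
    | false => exact ih (fun b hb => h b (by simp [hb]))

lemma pyGetD_append_lt (l : List String) (x : String) (i : Int)
    (h0 : 0 ≤ i) (h1 : i < l.length) :
    PySem.List.pyGetD (l ++ [x]) i "" = PySem.List.pyGetD l i "" := by
  obtain ⟨n, rfl⟩ : ∃ n : Nat, i = (n : Int) := ⟨i.toNat, by omega⟩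
  have hn : n < l.length := by exact_mod_cast h1
  rw [PySem.List.pyGetD_natCast, PySem.List.pyGetD_natCast]
  simp [List.getD, List.getElem?_append_left hn]

lemma pvFind_concat (q : String → Bool) (l : List String) (x : String) :
    pvFind q (l ++ [x]) = if q x then some (l.length : Int) else pvFind q l := by
  unfold pvFind
  have hlen : ((l ++ [x]).length : Int) - 1 = (l.length : Int) := by simp
  rw [hlen, PySem.List.pyRange_neg_one_cons (by omega)]
  simp only [List.find?]
  have hx : PySem.List.pyGetD (l ++ [x]) (l.length : Int) "" = x := by
    rw [PySem.List.pyGetD_natCast]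
    simp [List.getD]
  rw [hx]
  cases q x with
  | true => rfl
  | false =>
    apply find?_congr_mem
    intro i hi
    rw [PySem.List.mem_pyRange_neg_one] at hi
    rw [pyGetD_append_lt l x i (by omega) (by omega)]

lemma pvFold_eq (pron : List String) :
    (PySem.List.enumerate pron).foldl
      (fun (acc : Option Int × Option Int) ip =>
        if pvIsVowel ip.2 then
          ((if pvStressDigit ip.2 == 1 || pvStressDigit ip.2 == 2 then some ip.1 else acc.1),
           some ip.1)
        else acc)
      (none, none)
    = (pvFind (fun p => pvIsVowel p &&
          (pvStressDigit p == 1 || pvStressDigit p == 2)) pron,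
       pvFind (fun p => pvIsVowel p) pron) := by
  induction pron using List.reverseRecOn with
  | nil => simp [pvFind, PySem.List.pyRange_neg_one_eq_nil, PySem.List.enumerate]
  | append_singleton l x ih =>
    rw [PySem.List.enumerate_append, List.foldl_append, ih,
        pvFind_concat, pvFind_concat]
    have h1 : PySem.List.enumerate [x] (0 + l.length) = [((l.length : Int), x)] := by
      simp [PySem.List.enumerate]
    rw [h1]
    simp only [List.foldl_cons, List.foldl_nil]
    cases hv : pvIsVowel x with
    | false => simp
    | true =>
      cases hs : (pvStressDigit x == 1 || pvStressDigit x == 2) with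
      | false => simp
      | true => simp

-- ===== VERDICT (by name: the statement is the Claim_ definition above) =====
theorem tail_parts_spec : Claim_equal_tail_parts := by
  intro pron _
  unfold Spec_tail_parts tail_parts tail_parts_alt
  by_cases hp : pron = []
  · subst hp; rfl
  · rw [if_neg hp, pvFold_eq pron]
    rcases hS : pvFind (fun p => pvIsVowel p &&
        (pvStressDigit p == 1 || pvStressDigit p == 2)) pron with _ | s <;>
      rcases hV : pvFind (fun p => pvIsVowel p) pron with _ | v
    · simp only [pvFind] at hS hV
      rw [hS, hV]
      simp [Option.orElse]
    · have hv0 := pvFind_nonneg _ _ _ hV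
      simp only [pvFind] at hS hV
      rw [hS, hV]
      simp only [Option.getD_none, Option.getD_some, ite_true, Option.orElse]
      rw [if_neg (by omega : ¬ v = -1)]
    · have hs0 := pvFind_nonneg _ _ _ hS
      simp only [pvFind] at hS hV
      rw [hS, hV]
      simp only [Option.getD_some, Option.orElse]
      rw [if_neg (by omega : ¬ s = -1), if_neg (by omega : ¬ s = -1)]
    · have hs0 := pvFind_nonneg _ _ _ hS
      simp only [pvFind] at hS hV
      rw [hS, hV]
      simp only [Option.getD_some, Option.orElse]
      rw [if_neg (by omega : ¬ s = -1), if_neg (by omega : ¬ s = -1)]
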